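-- pv_equiv track=rewrite | github.com/bdefnet-personal/Advent-of-Code | 2025/Day_10/solution.py | create_matrix_of_equations
-- ===== SOURCE A (Python) =====
-- def create_matrix_of_equations(buttons, joltages):
--     matrix = []
--     for i in range(len(joltages)):
--         row = []
--         for j in range(len(buttons)):
--             if i in buttons[j]:
--                 row.append(1)
--             else:
--                 row.append(0)
--         matrix.append(row)
--     for i in range(len(joltages)):
--         matrix[i].append(joltages[i])
--     return matrix
-- ===== SOURCE B (Python) =====
-- def create_matrix_of_equations(buttons, joltages):
--     J = len(joltages)
--     matrix = [[0] * len(buttons) + [v] for v in joltages]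
--     for j, btn in enumerate(buttons):
--         for i in btn:
--             if 0 <= i < J:
--                 matrix[i][j] = 1
--     return matrix
-- ===== Notes on version B (the rewrite author's own statement) =====
-- stated objective: faster
-- what changed: B builds the zero matrix with the joltage column up front and scatters 1s by iterating over each button's sparse membership list (with a bounds guard), instead of testing 'i in buttons[j]' for every cell of the dense matrix.
import Mathlib
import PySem

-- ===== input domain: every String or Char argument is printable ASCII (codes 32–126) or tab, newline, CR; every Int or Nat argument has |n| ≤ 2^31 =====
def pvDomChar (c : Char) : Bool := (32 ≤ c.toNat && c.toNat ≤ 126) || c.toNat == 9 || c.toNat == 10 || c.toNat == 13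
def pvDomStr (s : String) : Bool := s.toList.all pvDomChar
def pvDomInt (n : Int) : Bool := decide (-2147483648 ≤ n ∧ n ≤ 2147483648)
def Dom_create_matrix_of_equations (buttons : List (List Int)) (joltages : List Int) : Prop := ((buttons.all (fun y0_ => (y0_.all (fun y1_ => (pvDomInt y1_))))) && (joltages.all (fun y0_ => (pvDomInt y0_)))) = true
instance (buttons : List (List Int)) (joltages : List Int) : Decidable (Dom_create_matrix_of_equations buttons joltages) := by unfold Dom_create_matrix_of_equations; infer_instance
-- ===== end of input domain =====

-- B builds the zero matrix with the joltage column first and scatters 1s from each button's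
-- membership list (bounds-guarded), instead of a per-cell membership test; alternative algorithm.

-- ===== PORT A =====
-- literal transliteration of A: dense double loop with membership test, then append joltages
def create_matrix_of_equations (buttons : List (List Int)) (joltages : List Int) : List (List Int) :=
  let matrix := (List.range joltages.length).foldl
    (fun m (i : Nat) =>
      m ++ [buttons.foldl (fun row b => row ++ [if (i : Int) ∈ b then (1 : Int) else 0]) []]) []
  -- matrix[i].append(joltages[i]); i is always in range for both lists
  (List.range joltages.length).foldl
    (fun m i => m.modify i (fun r => r ++ [joltages.getD i 0])) matrix

-- ===== PORT B =====
-- inner loop of B: for i in btn: if 0 <= i < J: matrix[i][j] = 1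
def pvScatterBtn (J : Nat) (j : Nat) (m : List (List Int)) (btn : List Int) : List (List Int) :=
  btn.foldl (fun m x => if 0 ≤ x ∧ x < (J : Int) then m.modify x.toNat (fun r => r.set j 1) else m) m

-- outer loop of B: for j, btn in enumerate(buttons)
def pvScatterAll (J : Nat) (bs : List (List Int)) (j : Nat) (m : List (List Int)) : List (List Int) :=
  match bs with
  | [] => m
  | b :: rest => pvScatterAll J rest (j + 1) (pvScatterBtn J j m b)

def create_matrix_of_equations_alt (buttons : List (List Int)) (joltages : List Int) : List (List Int) :=
  let J := joltages.length
  let matrix := joltages.map (fun v => List.replicate buttons.length (0 : Int) ++ [v])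
  pvScatterAll J buttons 0 matrix

-- ===== PRECONDITION & SPEC =====
def Spec_create_matrix_of_equations (buttons : List (List Int)) (joltages : List Int) (out : List (List Int)) : Prop := out = create_matrix_of_equations_alt buttons joltages
instance (buttons : List (List Int)) (joltages : List Int) (out : List (List Int)) : Decidable (Spec_create_matrix_of_equations buttons joltages out) := by unfold Spec_create_matrix_of_equations; infer_instance

-- ===== CLAIM (what is proved, stated in full; the proofs are below) =====
def Claim_equal_create_matrix_of_equations : Prop := ∀ (buttons : List (List Int)) (joltages : List Int), Dom_create_matrix_of_equations buttons joltages → Spec_create_matrix_of_equations buttons joltages (create_matrix_of_equations buttons joltages)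

-- ===== LEMMAS AND PROOFS =====

-- generic: appending one element per item in a foldl is map
theorem pv_foldl_push {α β : Type} (g : α → β) :
    ∀ (l : List α) (acc : List β), l.foldl (fun m i => m ++ [g i]) acc = acc ++ l.map g := by
  intro l
  induction l with
  | nil => simp
  | cons a t ih => intro acc; simp [List.foldl_cons, ih]

-- pointwise effect of the modify-each-index-of-range fold (A's second loop)
theorem pv_foldl_modify_range (f : Nat → List Int → List Int) :
    ∀ (n : Nat) (m0 : List (List Int)) (k : Nat),
      ((List.range n).foldl (fun m i => m.modify i (f i)) m0)[k]? =
        if k < n then (f k) <$> m0[k]? else m0[k]? := by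
  intro n
  induction n with
  | zero => simp
  | succ n ih =>
    intro m0 k
    rw [List.range_succ, List.foldl_append]
    simp only [List.foldl_cons, List.foldl_nil]
    rw [List.getElem?_modify, ih]
    rcases lt_trichotomy k n with h | h | h
    · rw [if_pos h, if_pos (Nat.lt_succ_of_lt h)]
      cases m0[k]? with
      | none => simp
      | some r => simp; intro h'; omega
    · subst h
      rw [if_neg (lt_irrefl k), if_pos (Nat.lt_succ_self k)]
      cases m0[k]? <;> simp
    · rw [if_neg (by omega : ¬ k < n), if_neg (by omega : ¬ k < n + 1)]
      cases m0[k]? with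
      | none => simp
      | some r => simp; intro h'; omega

-- scatter preserves the matrix shape
theorem pv_scatterBtn_length (J j : Nat) (btn : List Int) :
    ∀ (m : List (List Int)), (pvScatterBtn J j m btn).length = m.length := by
  induction btn with
  | nil => intro m; rfl
  | cons x t ih =>
    intro m
    show (pvScatterBtn J j (if 0 ≤ x ∧ x < (J : Int) then m.modify x.toNat (fun r => r.set j 1) else m) t).length = m.length
    rw [ih]; split <;> simp

-- pointwise effect of one button's scatter on a matrix of height J
theorem pv_scatterBtn_get (J j : Nat) (btn : List Int) :
    ∀ (m : List (List Int)), m.length = J → ∀ (i : Nat), i < J →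
      (pvScatterBtn J j m btn)[i]? =
        (fun r => if (i : Int) ∈ btn then r.set j 1 else r) <$> m[i]? := by
  induction btn with
  | nil =>
    intro m hm i hi
    show m[i]? = _
    cases m[i]? <;> simp
  | cons x t ih =>
    intro m hm i hi
    have step : pvScatterBtn J j m (x :: t)
        = pvScatterBtn J j (if 0 ≤ x ∧ x < (J : Int) then m.modify x.toNat (fun r => r.set j 1) else m) t := rfl
    rw [step]
    by_cases hg : 0 ≤ x ∧ x < (J : Int)
    · rw [if_pos hg]
      rw [ih _ (by simp [hm]) i hi, List.getElem?_modify]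
      by_cases hx : x = (i : Int)
      · have hxt : x.toNat = i := by omega
        have hm1 : (i : Int) ∈ x :: t := by rw [← hx]; exact List.mem_cons_self ..
        cases m[i]? with
        | none => simp
        | some r =>
          by_cases hmem : (i : Int) ∈ t <;> simp [hxt, hm1, hmem, List.set_set]
      · have hxt : ¬ x.toNat = i := by omega
        simp only [hxt, if_false]
        cases m[i]? with
        | none => simp
        | some r =>
          have : ((i : Int) ∈ x :: t) ↔ ((i : Int) ∈ t) := by
            constructor
            · intro h; rcases List.mem_cons.mp h with h | h
              · exact absurd h.symm hx
              · exact h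
            · exact fun h => List.mem_cons_of_mem _ h
          simp [this]
    · rw [if_neg hg]
      rw [ih _ hm i hi]
      have hx : ¬ x = (i : Int) := by
        intro h; apply hg; constructor <;> omega
      cases m[i]? with
      | none => simp
      | some r =>
        have : ((i : Int) ∈ x :: t) ↔ ((i : Int) ∈ t) := by
          constructor
          · intro h; rcases List.mem_cons.mp h with h | h
            · exact absurd h.symm hx
            · exact h
          · exact fun h => List.mem_cons_of_mem _ h
        simp [this]

-- per-row meaning of the full scatter
def pvRowFold (bs : List (List Int)) (j : Nat) (r : List Int) (i : Nat) : List Int :=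
  match bs with
  | [] => r
  | b :: rest => pvRowFold rest (j + 1) (if (i : Int) ∈ b then r.set j 1 else r) i

theorem pv_scatterAll_get (J : Nat) :
    ∀ (bs : List (List Int)) (j : Nat) (m : List (List Int)), m.length = J → ∀ (i : Nat), i < J →
      (pvScatterAll J bs j m)[i]? = (fun r => pvRowFold bs j r i) <$> m[i]? := by
  intro bs
  induction bs with
  | nil =>
    intro j m hm i hi
    show m[i]? = _
    cases m[i]? <;> simp [pvRowFold]
  | cons b rest ih =>
    intro j m hm i hi
    show (pvScatterAll J rest (j + 1) (pvScatterBtn J j m b))[i]? = _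
    rw [ih (j + 1) _ (by rw [pv_scatterBtn_length]; exact hm) i hi,
        pv_scatterBtn_get J j b m hm i hi]
    cases m[i]? <;> simp [pvRowFold]

theorem pv_scatterAll_length (J : Nat) :
    ∀ (bs : List (List Int)) (j : Nat) (m : List (List Int)),
      (pvScatterAll J bs j m).length = m.length := by
  intro bs
  induction bs with
  | nil => intro j m; rfl
  | cons b rest ih => intro j m; show (pvScatterAll J rest (j+1) _).length = _
                      rw [ih, pv_scatterBtn_length]

theorem pv_set_append (u : List Int) : ∀ (x a : Int) (t : List Int),
    (u ++ x :: t).set u.length a = u ++ a :: t := by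
  induction u with
  | nil => intro x a t; rfl
  | cons h u ih => intro x a t; simp [ih]

-- scattering into a fresh zero block writes exactly the membership map
theorem pv_rowFold_replicate (i : Nat) :
    ∀ (bs : List (List Int)) (u t : List Int),
      pvRowFold bs u.length (u ++ List.replicate bs.length (0 : Int) ++ t) i =
        u ++ bs.map (fun b => if (i : Int) ∈ b then (1 : Int) else 0) ++ t := by
  intro bs
  induction bs with
  | nil => intro u t; simp [pvRowFold]
  | cons b rest ih =>
    intro u t
    show pvRowFold rest (u.length + 1)
        (if (i : Int) ∈ b then (u ++ List.replicate (rest.length + 1) (0:Int) ++ t).set u.length 1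
         else (u ++ List.replicate (rest.length + 1) (0:Int) ++ t)) i = _
    have hrep : List.replicate (rest.length + 1) (0 : Int) = 0 :: List.replicate rest.length 0 := rfl
    by_cases hmem : (i : Int) ∈ b
    · have h1 : (u ++ List.replicate (rest.length + 1) (0:Int) ++ t).set u.length 1
          = (u ++ [(1:Int)]) ++ List.replicate rest.length 0 ++ t := by
        rw [List.append_assoc u,
            show List.replicate (rest.length + 1) (0:Int) ++ t
              = 0 :: (List.replicate rest.length 0 ++ t) from rfl,
            pv_set_append]
        simp
      have h2 := ih (u ++ [(1:Int)]) t
      simp only [hmem, if_true, h1]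
      rw [show (u ++ [(1:Int)]).length = u.length + 1 by simp] at h2
      rw [h2]
      simp [hmem]
    · have h2 := ih (u ++ [(0:Int)]) t
      simp only [hmem, if_false]
      have h1 : u ++ List.replicate (rest.length + 1) (0:Int) ++ t
          = (u ++ [(0:Int)]) ++ List.replicate rest.length 0 ++ t := by
        rw [hrep]; simp
      rw [h1]
      rw [show (u ++ [(0:Int)]).length = u.length + 1 by simp] at h2
      rw [h2]
      simp [hmem]

-- both sides, pointwise: row i is the membership map of buttons followed by joltages[i]
theorem pv_a_get (buttons : List (List Int)) (joltages : List Int) (k : Nat) :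
    (create_matrix_of_equations buttons joltages)[k]? =
      if k < joltages.length
      then some ((buttons.map (fun b => if (k : Int) ∈ b then (1:Int) else 0)) ++ [joltages.getD k 0])
      else none := by
  have hg : ∀ i : Nat,
      buttons.foldl (fun row b => row ++ [if (i : Int) ∈ b then (1 : Int) else 0]) []
        = buttons.map (fun b => if (i : Int) ∈ b then (1:Int) else 0) := by
    intro i; rw [pv_foldl_push]; simp
  unfold create_matrix_of_equations
  simp only
  rw [pv_foldl_modify_range]
  rw [pv_foldl_push]
  simp only [List.nil_append]
  by_cases hk : k < joltages.length
  · rw [if_pos hk, List.getElem?_map, List.getElem?_range hk]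
    simp only [Option.map_some, hg k]
    simp [List.getD, List.getElem?_eq_getElem hk]
    exact hk
  · rw [List.getElem?_eq_none (by rw [List.length_map, List.length_range]; omega)]
    simp [hk]

theorem pv_b_get (buttons : List (List Int)) (joltages : List Int) (k : Nat) :
    (create_matrix_of_equations_alt buttons joltages)[k]? =
      if k < joltages.length
      then some ((buttons.map (fun b => if (k : Int) ∈ b then (1:Int) else 0)) ++ [joltages.getD k 0])
      else none := by
  unfold create_matrix_of_equations_alt
  simp only
  by_cases hk : k < joltages.length
  · rw [pv_scatterAll_get joltages.length buttons 0 _ (by simp) k hk, if_pos hk]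
    have h := pv_rowFold_replicate k buttons [] [joltages[k]]
    simp only [List.length_nil, List.nil_append] at h
    simp [List.getElem?_eq_getElem hk, h, List.getD]
  · rw [if_neg hk, List.getElem?_eq_none]
    rw [pv_scatterAll_length]
    simp; omega

-- ===== VERDICT (by name: the statement is the Claim_ definition above) =====
theorem create_matrix_of_equations_spec : Claim_equal_create_matrix_of_equations := by
  intro buttons joltages _
  unfold Spec_create_matrix_of_equations
  apply List.ext_getElem?
  intro k
  rw [pv_a_get, pv_b_get]
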